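-- pv_equiv track=rewrite | github.com/chaseuebelhart/Projects | TetrisAgent/evolutionaryAgent/featureFunctions.py | num_blockades
-- ===== SOURCE A (Python) =====
-- def num_blockades(board):
--     numBlockades = 0
--     for col in range(0, len(board)):
--         colHasHole = False
--         emptySpace = False
--         colBlockades = 0
--         for row in range(len(board[col])-1, -1, -1):
--             if not board[col][row]:
--                 emptySpace = True
--             elif emptySpace:
--                 colHasHole = True
--
--             if colHasHole:
--                 colBlockades += 1
--         numBlockades += colBlockades
--     return numBlockades
-- ===== SOURCE B (Python) =====
-- def num_blockades(board):
--     total = 0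
--     for col in board:
--         seen_empty = False
--         for row in range(len(col) - 1, -1, -1):
--             if not col[row]:
--                 seen_empty = True
--             elif seen_empty:
--                 # first filled cell below an empty one: it and all rows under it count
--                 total += row + 1
--                 break
--     return total
-- ===== Notes on version B (the rewrite author's own statement) =====
-- stated objective: simpler
-- what changed: Instead of keeping a colHasHole flag and incrementing a per-cell counter for every remaining row, B finds the boundary row (first filled cell after an empty one, scanning from the top index down), adds the closed-form count row+1 and breaks to the next column.
import Mathlib
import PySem

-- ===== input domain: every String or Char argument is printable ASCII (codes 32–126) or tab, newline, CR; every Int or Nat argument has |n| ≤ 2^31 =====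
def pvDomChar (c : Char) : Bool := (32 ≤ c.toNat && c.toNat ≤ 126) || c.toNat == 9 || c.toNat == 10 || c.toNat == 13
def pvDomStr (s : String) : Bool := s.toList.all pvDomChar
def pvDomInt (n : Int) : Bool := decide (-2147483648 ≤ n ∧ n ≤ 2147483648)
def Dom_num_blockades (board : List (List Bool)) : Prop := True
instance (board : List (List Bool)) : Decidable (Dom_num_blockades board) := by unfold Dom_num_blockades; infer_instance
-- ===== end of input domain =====

-- B finds the boundary row per column and adds the closed-form count row+1, instead of
-- A's per-cell increment guarded by a colHasHole flag; objective: simpler.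

-- ===== PORT A =====
-- inner loop body: state (colHasHole, emptySpace, colBlockades), row index
def pvStepA (col : List Bool) (s : Bool × Bool × Int) (row : Int) : Bool × Bool × Int :=
  let cell := PySem.List.pyGetD col row false
  let empty' := if !cell then true else s.2.1
  let hole' := if !cell then s.1 else (if s.2.1 then true else s.1)
  let cb' := if hole' then s.2.2 + 1 else s.2.2
  (hole', empty', cb')

def num_blockades (board : List (List Bool)) : Int :=
  (PySem.List.pyRange 0 board.length 1).foldl
    (fun numBlockades colIdx =>
      let col := PySem.List.pyGetD board colIdx []
      let st := (PySem.List.pyRange ((col.length : Int) - 1) (-1) (-1)).foldl (pvStepA col)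
        (false, false, (0 : Int))
      numBlockades + st.2.2) 0

-- ===== PORT B =====
-- scan rows n-1, n-2, …, 0 of the column (second argument = rows remaining); at the first
-- filled cell after an empty one return row+1 (the break), else 0
def pvColScan (col : List Bool) (seen : Bool) : Nat → Int
  | 0 => 0
  | n + 1 =>
    let cell := PySem.List.pyGetD col (n : Int) false
    if !cell then pvColScan col true n
    else if seen then (n : Int) + 1
    else pvColScan col seen n

def num_blockades_alt (board : List (List Bool)) : Int :=
  board.foldl (fun total col => total + pvColScan col false col.length) 0

-- ===== PRECONDITION & SPEC =====
def Spec_num_blockades (board : List (List Bool)) (out : Int) : Prop := out = num_blockades_alt board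
instance (board : List (List Bool)) (out : Int) : Decidable (Spec_num_blockades board out) := by unfold Spec_num_blockades; infer_instance

-- ===== CLAIM (what is proved, stated in full; the proofs are below) =====
def Claim_equal_num_blockades : Prop := ∀ (board : List (List Bool)), Dom_num_blockades board → Spec_num_blockades board (num_blockades board)

-- ===== LEMMAS AND PROOFS =====

-- invariant of A's inner loop: with colHasHole already set it counts every remaining row;
-- otherwise it contributes exactly what B's boundary scan returns
theorem pvInner (col : List Bool) (n : Nat) : ∀ (hole empty : Bool) (cb : Int),
    ((PySem.List.pyRange ((n : Int) - 1) (-1) (-1)).foldl (pvStepA col) (hole, empty, cb)).2.2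
      = cb + (if hole then (n : Int) else pvColScan col empty n) := by
  induction n with
  | zero =>
    intro hole empty cb
    simp [pvColScan]
  | succ n ih =>
    intro hole empty cb
    have hcons : PySem.List.pyRange (((n:Nat) + 1 : Int) - 1) (-1) (-1)
        = ((n : Int)) :: PySem.List.pyRange ((n : Int) - 1) (-1) (-1) := by
      have h := PySem.List.pyRange_neg_one_cons (a := ((n:Nat) + 1 : Int) - 1) (b := (-1))
        (by push_cast; omega)
      simpa using h
    push_cast
    rw [hcons]
    simp only [List.foldl_cons]
    by_cases hc : PySem.List.pyGetD col (n : Int) false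
    · by_cases he : empty
      · simp only [pvStepA, hc, he, pvColScan, ih]
        simp
        ring
      · simp only [pvStepA, hc, he, pvColScan, ih]
        simp
        split_ifs <;> ring
    · simp only [pvStepA, hc, pvColScan, ih]
      simp
      split_ifs <;> ring

-- ===== VERDICT (by name: the statement is the Claim_ definition above) =====
theorem num_blockades_spec : Claim_equal_num_blockades := by
  intro board _
  unfold Spec_num_blockades num_blockades num_blockades_alt
  show (PySem.List.pyRange 0 (board.length : Int) 1).foldl
      (fun acc colIdx => acc +
        ((PySem.List.pyRange (((PySem.List.pyGetD board colIdx []).length : Int) - 1) (-1) (-1)).foldl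
          (pvStepA (PySem.List.pyGetD board colIdx [])) (false, false, (0 : Int))).2.2) 0
    = board.foldl (fun total col => total + pvColScan col false col.length) 0
  rw [PySem.List.foldl_pyRange_zero_pyGetD' board []
    (fun acc col => acc +
      ((PySem.List.pyRange ((col.length : Int) - 1) (-1) (-1)).foldl (pvStepA col)
        (false, false, (0 : Int))).2.2) 0]
  induction board using List.reverseRecOn with
  | nil => rfl
  | append_singleton xs col ih =>
    simp only [List.foldl_append, List.foldl_cons, List.foldl_nil, pvInner]
    simp
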